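-- pv_equiv track=rewrite | github.com/JulienPaterna/Python | exos_bac/s16/s16exo1.py | recherche_indices_classement
-- ===== SOURCE A (Python) =====
-- def recherche_indices_classement(elt, tab):
--     first = []
--     second = []
--     third = []
--     for i in range(len(tab)):
--         if (tab[i] < elt):
--             first.append(i)
--         elif (tab[i] == elt):
--             second.append(i)
--         elif (tab[i] > elt):
--             third.append(i)
--     return first, second, third
-- ===== SOURCE B (Python) =====
-- def recherche_indices_classement(elt, tab):
--     first = [i for i, x in enumerate(tab) if x < elt]
--     second = [i for i, x in enumerate(tab) if x == elt]
--     third = [i for i, x in enumerate(tab) if x > elt]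
--     return first, second, third
-- ===== Notes on version B (the rewrite author's own statement) =====
-- stated objective: idiomatic
-- what changed: A's single index loop with three mutable accumulators and an if/elif chain is replaced by three independent list comprehensions over enumerate(tab), one per category.
import Mathlib
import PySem

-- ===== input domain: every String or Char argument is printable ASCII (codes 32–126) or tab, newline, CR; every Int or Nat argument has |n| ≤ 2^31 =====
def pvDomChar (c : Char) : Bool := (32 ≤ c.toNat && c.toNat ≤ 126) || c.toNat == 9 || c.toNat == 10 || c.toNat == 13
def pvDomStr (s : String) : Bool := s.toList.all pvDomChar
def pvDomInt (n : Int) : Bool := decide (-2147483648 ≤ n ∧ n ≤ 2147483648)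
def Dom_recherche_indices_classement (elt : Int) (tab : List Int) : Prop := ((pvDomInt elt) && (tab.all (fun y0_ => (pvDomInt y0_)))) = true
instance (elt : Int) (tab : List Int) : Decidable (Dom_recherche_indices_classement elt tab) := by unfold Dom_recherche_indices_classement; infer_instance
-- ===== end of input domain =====

-- B replaces A's one-pass three-accumulator index loop by three independent
-- comprehensions over enumerate(tab), one per category (idiomatic; same cost).

-- ===== PORT A =====
-- single index loop over range(len(tab)), appending i to one of three accumulators
def recherche_indices_classement (elt : Int) (tab : List Int) : List Int × List Int × List Int :=
  let st := (PySem.List.pyRange 0 (tab.length : Int) 1).foldl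
    (fun (st : List Int × List Int × List Int) i =>
      let v := PySem.List.pyGetD tab i 0   -- tab[i]; i is always in range here
      if v < elt then (st.1 ++ [i], st.2.1, st.2.2)
      else if v = elt then (st.1, st.2.1 ++ [i], st.2.2)
      else if v > elt then (st.1, st.2.1, st.2.2 ++ [i])
      else st)
    ([], [], [])
  st

-- ===== PORT B =====
-- three list comprehensions '[i for i, x in enumerate(tab) if x ? elt]'
def recherche_indices_classement_alt (elt : Int) (tab : List Int) : List Int × List Int × List Int :=
  ((PySem.List.enumerate tab 0).filterMap (fun p => if p.2 < elt then some p.1 else none),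
   (PySem.List.enumerate tab 0).filterMap (fun p => if p.2 = elt then some p.1 else none),
   (PySem.List.enumerate tab 0).filterMap (fun p => if p.2 > elt then some p.1 else none))

-- ===== PRECONDITION & SPEC =====
def Spec_recherche_indices_classement (elt : Int) (tab : List Int) (out : List Int × List Int × List Int) : Prop := out = recherche_indices_classement_alt elt tab
instance (elt : Int) (tab : List Int) (out : List Int × List Int × List Int) : Decidable (Spec_recherche_indices_classement elt tab out) := by unfold Spec_recherche_indices_classement; infer_instance

-- ===== CLAIM (what is proved, stated in full; the proofs are below) =====
def Claim_equal_recherche_indices_classement : Prop := ∀ (elt : Int) (tab : List Int), Dom_recherche_indices_classement elt tab → Spec_recherche_indices_classement elt tab (recherche_indices_classement elt tab)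

-- ===== LEMMAS AND PROOFS =====

-- a filterMap with an 'if p then some x else none' body is a filter
theorem filterMap_guard_eq_filter {α : Type} (p : α → Prop) [DecidablePred p] (l : List α) :
    l.filterMap (fun x => if p x then some x else none) = l.filter (fun x => decide (p x)) := by
  induction l with
  | nil => rfl
  | cons x xs ih => by_cases h : p x <;> simp [h, ih]

-- B's comprehension over enumerate, in terms of a filter of the index range
theorem comp_eq_filter (tab : List Int) (q : Int → Prop) [DecidablePred q] :
    (PySem.List.enumerate tab 0).filterMap (fun p => if q p.2 then some p.1 else none)
      = (PySem.List.pyRange 0 (tab.length : Int) 1).filter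
          (fun i => decide (q (PySem.List.pyGetD tab i 0))) := by
  rw [PySem.List.enumerate_eq_map_pyRange tab 0, List.filterMap_map]
  rw [show ((fun p : Int × Int => if q p.2 then some p.1 else none) ∘
        fun j => (j, PySem.List.pyGetD tab j 0))
      = fun j => if q (PySem.List.pyGetD tab j 0) then some j else none from rfl]
  exact filterMap_guard_eq_filter _ _

-- A's fold with three append-accumulators, characterised as three filters
theorem foldl_trip (elt : Int) (g : Int → Int) (l : List Int) (a b c : List Int) :
    l.foldl (fun (st : List Int × List Int × List Int) i =>
        let v := g i
        if v < elt then (st.1 ++ [i], st.2.1, st.2.2)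
        else if v = elt then (st.1, st.2.1 ++ [i], st.2.2)
        else if v > elt then (st.1, st.2.1, st.2.2 ++ [i])
        else st) (a, b, c)
      = (a ++ l.filter (fun i => decide (g i < elt)),
         b ++ l.filter (fun i => decide (g i = elt)),
         c ++ l.filter (fun i => decide (g i > elt))) := by
  induction l generalizing a b c with
  | nil => simp
  | cons x xs ih =>
    simp only [List.foldl_cons, List.filter_cons]
    rcases lt_trichotomy (g x) elt with h | h | h
    · have h1 : ¬ g x = elt := by omega
      have h2 : ¬ g x > elt := by omega
      simp [h, h1, h2, ih]
    · have h1 : ¬ g x < elt := by omega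
      have h2 : ¬ g x > elt := by omega
      simp [h, h1, h2, ih]
    · have h1 : ¬ g x < elt := by omega
      have h2 : ¬ g x = elt := by omega
      simp [h, h1, h2, ih]

-- ===== VERDICT (by name: the statement is the Claim_ definition above) =====
theorem recherche_indices_classement_spec : Claim_equal_recherche_indices_classement := by
  intro elt tab _
  show recherche_indices_classement elt tab = recherche_indices_classement_alt elt tab
  unfold recherche_indices_classement recherche_indices_classement_alt
  rw [comp_eq_filter tab (· < elt), comp_eq_filter tab (· = elt), comp_eq_filter tab (· > elt)]
  simpa using foldl_trip elt (fun i => PySem.List.pyGetD tab i 0)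
    (PySem.List.pyRange 0 (tab.length : Int) 1) [] [] []
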